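-- pv_equiv track=rewrite | github.com/YassineOUAHMANE/Advent_Of_Code | Day_7/part_2.py | generate_expressions
-- ===== SOURCE A (Python) =====
-- def generate_expressions(numbers,idx = 0,current_expression = ' '):
--      expressions = []
--      if idx == len(numbers) -1:
--           current_expression += str(numbers[idx])
--           return [current_expression]
--
--      operators = ['*','+']
--      for op in operators:
--                new_expression  = current_expression + str(numbers[idx]) + op
--                expressions.extend(generate_expressions(numbers,idx+1,new_expression))
--      return expressions
-- ===== SOURCE B (Python) =====
-- import itertools
--
-- def generate_expressions(numbers, idx=0, current_expression=' '):
--     head = current_expression + str(numbers[idx])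
--     results = []
--     for ops in itertools.product('*+', repeat=len(numbers) - 1 - idx):
--         expr, i = head, idx
--         for op in ops:
--             i += 1
--             expr += op + str(numbers[i])
--         results.append(expr)
--     return results
-- ===== Notes on version B (the rewrite author's own statement) =====
-- stated objective: idiomatic
-- what changed: Replaces the binary recursion that threads a growing prefix string through call frames with a flat iterative enumeration: itertools.product yields every operator tuple in the same lexicographic order, and each expression string is assembled in one left-to-right pass.
import Mathlib
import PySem

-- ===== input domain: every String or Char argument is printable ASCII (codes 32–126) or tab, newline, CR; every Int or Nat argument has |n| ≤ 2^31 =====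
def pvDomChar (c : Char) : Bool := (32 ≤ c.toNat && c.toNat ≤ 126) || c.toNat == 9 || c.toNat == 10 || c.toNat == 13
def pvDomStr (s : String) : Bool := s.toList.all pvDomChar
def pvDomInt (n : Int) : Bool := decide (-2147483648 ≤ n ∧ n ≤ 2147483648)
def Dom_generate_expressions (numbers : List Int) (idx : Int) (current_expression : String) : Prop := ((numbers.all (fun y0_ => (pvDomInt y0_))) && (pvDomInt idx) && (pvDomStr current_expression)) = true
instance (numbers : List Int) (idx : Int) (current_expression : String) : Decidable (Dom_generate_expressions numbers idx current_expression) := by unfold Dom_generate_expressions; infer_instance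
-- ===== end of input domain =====

-- B replaces A's binary recursion by an iterative product-enumeration of operator tuples (idiomatic, same cost).

-- ===== PORT A =====
-- termination helper for the port's recursion (a successful pyGet? bounds the index)
lemma pvGet?_lt (xs : List Int) (i : Int) (v : Int) (h : PySem.List.pyGet? xs i = some v) :
    i < (xs.length : Int) := by
  simp only [PySem.List.pyGet?, PySem.List.pyIdx?] at h
  split_ifs at h <;> first | omega | simp at h

def generate_expressions (numbers : List Int) (idx : Int) (current_expression : String) : List String :=
  if idx = (numbers.length : Int) - 1 then
    match PySem.List.pyGet? numbers idx with
    | some v => [current_expression ++ PySem.Int.toStr v]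
    | none => []   -- Python raises IndexError here (excluded by Pre_)
  else
    match h : PySem.List.pyGet? numbers idx with
    | some v =>
        [("*" : String), "+"].foldl
          (fun acc op =>
            acc ++ generate_expressions numbers (idx + 1)
                     (current_expression ++ PySem.Int.toStr v ++ op)) []
    | none => []   -- Python raises IndexError here (excluded by Pre_)
termination_by ((numbers.length : Int) - idx).toNat
decreasing_by
  all_goals
    have := pvGet?_lt numbers idx _ h
    omega

-- ===== PORT B =====
-- itertools.product('*+', repeat=k) in Python's lexicographic order
def pvOpTuples : Nat → List (List String)
  | 0 => [[]]
  | n + 1 => ([("*" : String), "+"]).flatMap (fun a => (pvOpTuples n).map (a :: ·))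

-- the inner loop of Source B: state (expr, i), one step per operator
def pvBuild (numbers : List Int) (ops : List String) (ei : String × Int) : String :=
  (ops.foldl
    (fun (p : String × Int) op =>
      (p.1 ++ op ++ PySem.Int.toStr (PySem.List.pyGetD numbers (p.2 + 1) 0), p.2 + 1)) ei).1

def generate_expressions_alt (numbers : List Int) (idx : Int) (current_expression : String) : List String :=
  let head := current_expression ++ PySem.Int.toStr (PySem.List.pyGetD numbers idx 0)
  (pvOpTuples ((numbers.length : Int) - 1 - idx).toNat).map
    (fun ops => pvBuild numbers ops (head, idx))

-- ===== PRECONDITION & SPEC =====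
-- Pre_ is exactly the inputs on which A returns: every index from idx to len-1 (Python semantics,
-- negative idx counts from the end) is valid; outside it A raises IndexError.
def Pre_generate_expressions (numbers : List Int) (idx : Int) (current_expression : String) : Prop :=
  -(numbers.length : Int) ≤ idx ∧ idx ≤ (numbers.length : Int) - 1

instance (numbers : List Int) (idx : Int) (current_expression : String) : Decidable (Pre_generate_expressions numbers idx current_expression) := by unfold Pre_generate_expressions; infer_instance

def pvWitness_generate_expressions : List Int × Int × String := ([1, 2, 3], 0, " ")

def Spec_generate_expressions (numbers : List Int) (idx : Int) (current_expression : String) (out : List String) : Prop := out = generate_expressions_alt numbers idx current_expression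
instance (numbers : List Int) (idx : Int) (current_expression : String) (out : List String) : Decidable (Spec_generate_expressions numbers idx current_expression out) := by unfold Spec_generate_expressions; infer_instance

-- ===== CLAIM (what is proved, stated in full; the proofs are below) =====
def Claim_equal_generate_expressions : Prop := ∀ (numbers : List Int) (idx : Int) (current_expression : String), Dom_generate_expressions numbers idx current_expression → Pre_generate_expressions numbers idx current_expression → Spec_generate_expressions numbers idx current_expression (generate_expressions numbers idx current_expression)

-- ===== LEMMAS AND PROOFS =====

lemma pvGet_some (xs : List Int) (i : Int) (h1 : -(xs.length : Int) ≤ i) (h2 : i < (xs.length : Int)) :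
    PySem.List.pyGet? xs i = some (PySem.List.pyGetD xs i 0) := by
  have hs : (PySem.List.pyGet? xs i).isSome := by
    simp only [PySem.List.pyGet?, PySem.List.pyIdx?]
    split_ifs <;> simp <;> omega
  obtain ⟨v, hv⟩ := Option.isSome_iff_exists.mp hs
  simp [PySem.List.pyGetD, hv]

lemma pv_main (numbers : List Int) :
    ∀ (k : Nat) (idx : Int) (cur : String),
      -(numbers.length : Int) ≤ idx → idx = (numbers.length : Int) - 1 - k →
      generate_expressions numbers idx cur =
        (pvOpTuples k).map
          (fun ops =>
            pvBuild numbers ops (cur ++ PySem.Int.toStr (PySem.List.pyGetD numbers idx 0), idx)) := by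
  intro k
  induction k with
  | zero =>
      intro idx cur hlo hidx
      rw [generate_expressions]
      rw [if_pos (by omega), pvGet_some numbers idx (by omega) (by omega)]
      simp [pvOpTuples, pvBuild]
  | succ n ih =>
      intro idx cur hlo hidx
      rw [generate_expressions]
      rw [if_neg (by omega)]
      rw [pvGet_some numbers idx (by omega) (by omega)]
      simp only [List.foldl, List.nil_append]
      rw [ih (idx + 1) _ (by omega) (by omega), ih (idx + 1) _ (by omega) (by omega)]
      simp only [pvOpTuples, List.flatMap_cons, List.flatMap_nil, List.map_append,
        List.map_map, List.append_nil]
      rfl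

theorem generate_expressions_spec : Claim_equal_generate_expressions := by
  intro numbers idx cur _ hpre
  obtain ⟨hlo, hhi⟩ := hpre
  unfold Spec_generate_expressions generate_expressions_alt
  have hk : idx = (numbers.length : Int) - 1 - (((numbers.length : Int) - 1 - idx).toNat : Int) := by
    omega
  exact pv_main numbers (((numbers.length : Int) - 1 - idx).toNat) idx cur hlo hk
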